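-- pv_equiv track=rewrite | github.com/persnoid/LinkedInResumeBuilder | python/pdf_parser.py | _get_section_lines
-- ===== SOURCE A (Python) =====
-- from typing import Dict, List, Any, Optional
--
-- def _get_section_lines(lines: List[str], sections: Dict[str, List[int]], section_type: str) -> List[str]:
--     """Get lines belonging to a specific section"""
--     if section_type not in sections:
--         return []
--
--     section_lines = []
--     for start_idx in sections[section_type]:
--         # Find end of section
--         end_idx = len(lines)
--         for other_section, indices in sections.items():
--             if other_section != section_type:
--                 for idx in indices:
--                     if idx > start_idx and idx < end_idx:
--                         end_idx = idx
--
--         # Extract lines for this section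
--         section_content = lines[start_idx + 1:end_idx]
--         section_lines.extend([line.strip() for line in section_content if line.strip()])
--
--     return section_lines
-- ===== SOURCE B (Python) =====
-- from bisect import bisect_right
-- from typing import Dict, List
--
-- def _get_section_lines(lines: List[str], sections: Dict[str, List[int]], section_type: str) -> List[str]:
--     """Get lines belonging to a specific section (sorted boundaries + binary search)."""
--     if section_type not in sections:
--         return []
--
--     n = len(lines)
--     # All boundary indices of the other sections, sorted once.
--     others = sorted(idx for name, idxs in sections.items() if name != section_type for idx in idxs)
--
--     section_lines = []
--     for start_idx in sections[section_type]:
--         j = bisect_right(others, start_idx)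
--         end_idx = others[j] if j < len(others) else n
--         section_lines.extend([line.strip() for line in lines[start_idx + 1:end_idx] if line.strip()])
--     return section_lines
-- ===== Notes on version B (the rewrite author's own statement) =====
-- stated objective: alternative
-- what changed: Instead of rescanning every other section's index list for each start index (nested shrink-loop), B sorts all other-section boundary indices once and finds each section's end boundary with one binary search (bisect_right).
import Mathlib
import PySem

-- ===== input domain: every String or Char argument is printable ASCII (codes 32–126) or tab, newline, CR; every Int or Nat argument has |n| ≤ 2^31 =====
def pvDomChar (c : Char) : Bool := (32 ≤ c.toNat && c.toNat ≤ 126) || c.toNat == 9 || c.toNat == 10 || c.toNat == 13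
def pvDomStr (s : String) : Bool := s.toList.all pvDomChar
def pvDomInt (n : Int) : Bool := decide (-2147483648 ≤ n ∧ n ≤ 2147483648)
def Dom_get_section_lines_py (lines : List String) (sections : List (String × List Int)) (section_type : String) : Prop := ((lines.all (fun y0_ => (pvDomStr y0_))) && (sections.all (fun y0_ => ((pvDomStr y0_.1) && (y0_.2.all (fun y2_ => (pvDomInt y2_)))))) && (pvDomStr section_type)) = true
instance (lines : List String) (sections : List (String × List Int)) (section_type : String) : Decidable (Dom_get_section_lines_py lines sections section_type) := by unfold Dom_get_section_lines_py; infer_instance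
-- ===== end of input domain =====

-- B replaces A's per-start rescan of every other section's indices (a nested
-- shrink-loop) by one sorted list of all other-section boundaries plus a binary
-- search (bisect_right) per start; return values proved equal on the whole domain.

-- ===== PORT A =====
-- Literal port of _get_section_lines: for each start index, an inner double loop
-- over all other sections' indices shrinks end_idx; then slice, strip, filter.
def get_section_lines_py (lines : List String) (sections : List (String × List Int)) (section_type : String) : List String :=
  match sections.find? (fun kv => kv.1 == section_type) with
  | none => []
  | some kv =>
    kv.2.foldl (fun section_lines start_idx =>
      let end_idx : Int := sections.foldl (fun e osec =>
        if osec.1 ≠ section_type then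
          osec.2.foldl (fun e idx => if idx > start_idx ∧ idx < e then idx else e) e
        else e) (lines.length : Int)
      let section_content := PySem.List.slice lines (some (start_idx + 1)) (some end_idx)
      section_lines ++
        (section_content.filter (fun l => !(PySem.Str.strip l).toList.isEmpty)).map PySem.Str.strip) []

-- ===== PORT B =====
-- Literal port of Source B: sort all other-section indices once, bisect_right per start.
def get_section_lines_py_alt (lines : List String) (sections : List (String × List Int)) (section_type : String) : List String :=
  match sections.find? (fun kv => kv.1 == section_type) with
  | none => []
  | some kv =>
    let n : Int := lines.length
    let others : List Int :=
      PySem.List.sorted ((sections.filter (fun p => p.1 != section_type)).flatMap (fun p => p.2)) (fun x => x)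
    kv.2.foldl (fun section_lines start_idx =>
      let j := PySem.List.bisectRight others start_idx
      let end_idx : Int := if h : j < others.length then others[j] else n
      section_lines ++
        ((PySem.List.slice lines (some (start_idx + 1)) (some end_idx)).filter
          (fun l => !(PySem.Str.strip l).toList.isEmpty)).map PySem.Str.strip) []

-- ===== PRECONDITION & SPEC =====
def Spec_get_section_lines_py (lines : List String) (sections : List (String × List Int)) (section_type : String) (out : List String) : Prop := out = get_section_lines_py_alt lines sections section_type
instance (lines : List String) (sections : List (String × List Int)) (section_type : String) (out : List String) : Decidable (Spec_get_section_lines_py lines sections section_type out) := by unfold Spec_get_section_lines_py; infer_instance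

-- ===== CLAIM (what is proved, stated in full; the proofs are below) =====
def Claim_equal_get_section_lines_py : Prop := ∀ (lines : List String) (sections : List (String × List Int)) (section_type : String), Dom_get_section_lines_py lines sections section_type → Spec_get_section_lines_py lines sections section_type (get_section_lines_py lines sections section_type)

-- ===== LEMMAS AND PROOFS =====

-- A's inner double loop over sections is the same fold over the flattened list of
-- all other sections' indices.
theorem pv_fuseA (st : String) (s : Int) :
    ∀ (secs : List (String × List Int)) (e : Int),
      secs.foldl (fun e osec =>
        if osec.1 ≠ st then
          osec.2.foldl (fun e idx => if idx > s ∧ idx < e then idx else e) e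
        else e) e
      = ((secs.filter (fun p => p.1 != st)).flatMap (fun p => p.2)).foldl
          (fun e idx => if idx > s ∧ idx < e then idx else e) e := by
  intro secs
  induction secs with
  | nil => intro e; simp
  | cons p t ih =>
    intro e
    rw [List.foldl_cons]
    by_cases h : p.1 = st
    · rw [if_neg (by simp [h]), List.filter_cons_of_neg (by simp [h])]
      exact ih e
    · rw [if_pos h, List.filter_cons_of_pos (by simp [h]), List.flatMap_cons, List.foldl_append]
      exact ih _

-- The shrinking fold is a running minimum over the indices greater than s.
theorem pv_fold_min (s : Int) :
    ∀ (l : List Int) (e : Int),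
      l.foldl (fun e idx => if idx > s ∧ idx < e then idx else e) e
      = (l.filter (fun x => decide (s < x))).foldl min e := by
  intro l
  induction l with
  | nil => intro e; simp
  | cons x t ih =>
    intro e
    rw [List.foldl_cons]
    by_cases hx : s < x
    · rw [List.filter_cons_of_pos (by simpa using hx), List.foldl_cons]
      have hg : (if x > s ∧ x < e then x else e) = min e x := by
        rw [min_def]; split_ifs <;> omega
      rw [hg]; exact ih _
    · rw [List.filter_cons_of_neg (by simpa using hx)]
      have hg : (if x > s ∧ x < e then x else e) = e := by
        split_ifs with h
        · omega
        · rfl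
      rw [hg]; exact ih _

theorem pv_foldmin_le_init : ∀ (l : List Int) (e : Int), l.foldl min e ≤ e := by
  intro l
  induction l with
  | nil => intro e; simp
  | cons a t ih =>
    intro e
    calc t.foldl min (min e a) ≤ min e a := ih (min e a)
      _ ≤ e := min_le_left _ _

theorem pv_foldmin_le_mem : ∀ (l : List Int) (e x : Int), x ∈ l → l.foldl min e ≤ x := by
  intro l
  induction l with
  | nil => intro e x hx; simp at hx
  | cons a t ih =>
    intro e x hx
    rcases List.mem_cons.mp hx with rfl | hx
    · calc t.foldl min (min e x) ≤ min e x := pv_foldmin_le_init t _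
        _ ≤ x := min_le_right _ _
    · exact ih (min e a) x hx

theorem pv_foldmin_mem_or : ∀ (l : List Int) (e : Int), l.foldl min e = e ∨ l.foldl min e ∈ l := by
  intro l
  induction l with
  | nil => intro e; left; rfl
  | cons a t ih =>
    intro e
    rcases ih (min e a) with h | h
    · rw [List.foldl_cons, h]
      rcases min_cases e a with ⟨h1, _⟩ | ⟨h1, _⟩
      · left; exact h1
      · right; rw [h1]; exact List.mem_cons_self
    · right; exact List.mem_cons_of_mem a h

-- Clamping: a slice's stop bound past the length is the length.
theorem pv_slice_min {α : Type} (xs : List α) (a b : Int) :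
    PySem.List.slice xs (some a) (some (min (xs.length : Int) b))
      = PySem.List.slice xs (some a) (some b) := by
  by_cases h : b ≤ (xs.length : Int)
  · rw [min_eq_right h]
  · rw [min_eq_left (by omega)]
    have hc : PySem.List.clampIdx xs.length ((xs.length : Nat) : Int)
        = PySem.List.clampIdx xs.length b := by
      simp only [PySem.List.clampIdx]
      split_ifs <;> omega
    simp only [PySem.List.slice, hc]

-- Per-start boundary equality: A's shrink-loop end equals B's bisected end, up to
-- clamping at the number of lines.
theorem pv_end_eq (lines : List String) (secs : List (String × List Int)) (st : String) (s : Int) :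
    (secs.foldl (fun e osec =>
        if osec.1 ≠ st then
          osec.2.foldl (fun e idx => if idx > s ∧ idx < e then idx else e) e
        else e) (lines.length : Int))
    = min (lines.length : Int)
        (let others := PySem.List.sorted ((secs.filter (fun p => p.1 != st)).flatMap (fun p => p.2)) (fun x => x)
         let j := PySem.List.bisectRight others s
         if h : j < others.length then others[j] else (lines.length : Int)) := by
  rw [pv_fuseA, pv_fold_min]
  set L := (secs.filter (fun p => p.1 != st)).flatMap (fun p => p.2) with hLdef
  set others := PySem.List.sorted L (fun x => x) with ho
  set j := PySem.List.bisectRight others s with hj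
  set F := L.filter (fun x => decide (s < x)) with hFdef
  set n : Int := (lines.length : Int) with hn
  have hpw : others.Pairwise (fun a b => a ≤ b) := PySem.List.sorted_pairwise L (fun x => x)
  obtain ⟨hjle, hlt, hgt⟩ := PySem.List.bisectRight_spec others s hpw
  by_cases h : j < others.length
  · rw [dif_pos h]
    set eB := others[j] with heB
    have heBL : eB ∈ L := (PySem.List.mem_sorted L (fun x => x) false eB).mp (List.getElem_mem h)
    have hseB : s < eB := hgt j h le_rfl
    have heBF : eB ∈ F := by
      rw [hFdef]; exact List.mem_filter.mpr ⟨heBL, by simpa using hseB⟩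
    have h1 : F.foldl min n ≤ eB := pv_foldmin_le_mem F n eB heBF
    have h2 : F.foldl min n ≤ n := pv_foldmin_le_init F n
    have h3 : ∀ x ∈ F, eB ≤ x := by
      intro x hxF
      obtain ⟨hxL, hsx⟩ := List.mem_filter.mp hxF
      have hsx' : s < x := by simpa using hsx
      have hxo : x ∈ others := (PySem.List.mem_sorted L (fun x => x) false x).mpr hxL
      obtain ⟨k, hk, hxk⟩ := List.mem_iff_getElem.mp hxo
      have hjk : j ≤ k := by
        by_contra hkj
        have := hlt k hk (by omega)
        omega
      rcases eq_or_lt_of_le hjk with rfl | hjk'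
      · omega
      · have := List.pairwise_iff_getElem.mp hpw j k h hk hjk'
        omega
    rcases pv_foldmin_mem_or F n with he | he
    · omega
    · have := h3 _ he
      omega
  · rw [dif_neg h]
    have hF0 : F = [] := by
      rw [hFdef]
      rw [List.filter_eq_nil_iff]
      intro x hxL
      have hxo : x ∈ others := (PySem.List.mem_sorted L (fun x => x) false x).mpr hxL
      obtain ⟨k, hk, hxk⟩ := List.mem_iff_getElem.mp hxo
      have := hlt k hk (by omega)
      simp only [decide_eq_true_eq]
      omega
    rw [hF0]
    simp

theorem get_section_lines_py_eq (lines : List String) (secs : List (String × List Int)) (st : String) :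
    get_section_lines_py lines secs st = get_section_lines_py_alt lines secs st := by
  unfold get_section_lines_py get_section_lines_py_alt
  cases hfind : secs.find? (fun kv => kv.1 == st) with
  | none => rfl
  | some kv =>
    simp only []
    have hfun : (fun (section_lines : List String) (start_idx : Int) =>
        let end_idx : Int := secs.foldl (fun e osec =>
          if osec.1 ≠ st then
            osec.2.foldl (fun e idx => if idx > start_idx ∧ idx < e then idx else e) e
          else e) (lines.length : Int)
        let section_content := PySem.List.slice lines (some (start_idx + 1)) (some end_idx)
        section_lines ++
          (section_content.filter (fun l => !(PySem.Str.strip l).toList.isEmpty)).map PySem.Str.strip)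
      = (fun (section_lines : List String) (start_idx : Int) =>
        let others : List Int :=
          PySem.List.sorted ((secs.filter (fun p => p.1 != st)).flatMap (fun p => p.2)) (fun x => x)
        let j := PySem.List.bisectRight others start_idx
        let end_idx : Int := if h : j < others.length then others[j] else (lines.length : Int)
        section_lines ++
          ((PySem.List.slice lines (some (start_idx + 1)) (some end_idx)).filter
            (fun l => !(PySem.Str.strip l).toList.isEmpty)).map PySem.Str.strip) := by
      funext acc s
      simp only []
      rw [pv_end_eq lines secs st s, pv_slice_min]
    rw [hfun]

-- ===== VERDICT (by name: the statement is the Claim_ definition above) =====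
theorem get_section_lines_py_spec : Claim_equal_get_section_lines_py := by
  intro lines sections section_type _
  unfold Spec_get_section_lines_py
  exact get_section_lines_py_eq lines sections section_type
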